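-- pv_equiv track=rewrite | github.com/abeermohamed1/Tweets-Sentiment-Analysis | Tweets Sentiment Analysis Project.py | count_slang
-- ===== SOURCE A (Python) =====
-- def lower_case(tweet):
--     tweet = tweet.casefold()
--     return tweet
--
-- def count_slang(tweet, slang_lexicon):
--     tweet = tweet.strip().split()
--     tweet_join = ' '.join(tweet)
--     tweet_lower = lower_case(tweet_join)
--     tweet_lower = tweet_lower.strip().split()
--     count = 0
--     for abr in slang_lexicon:
--         if abr[0] in tweet_lower:
--             for i in range(0, len(tweet_lower)):
--                 if tweet_lower[i] == abr[0]:
--                     count = count + 1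
--     return count
-- ===== SOURCE B (Python) =====
-- def lower_case(tweet):
--     tweet = tweet.casefold()
--     return tweet
--
-- def count_slang(tweet, slang_lexicon):
--     words = lower_case(' '.join(tweet.strip().split())).strip().split()
--     slang_counts = {}
--     for abr in slang_lexicon:
--         slang_counts[abr[0]] = slang_counts.get(abr[0], 0) + 1
--     return sum(slang_counts.get(w, 0) for w in words)
-- ===== Notes on version B (the rewrite author's own statement) =====
-- stated objective: alternative
-- what changed: Instead of scanning the whole tweet word list once per lexicon entry (a membership test plus a full indexed scan), B builds a frequency dictionary of the lexicon heads once and makes a single pass over the tweet words summing lookups; the driving loop flips from lexicon entries to tweet tokens.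
-- outside the precondition, e.g. on count_slang('hi', [[]]): A raises IndexError, B raises IndexError
import Mathlib
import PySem

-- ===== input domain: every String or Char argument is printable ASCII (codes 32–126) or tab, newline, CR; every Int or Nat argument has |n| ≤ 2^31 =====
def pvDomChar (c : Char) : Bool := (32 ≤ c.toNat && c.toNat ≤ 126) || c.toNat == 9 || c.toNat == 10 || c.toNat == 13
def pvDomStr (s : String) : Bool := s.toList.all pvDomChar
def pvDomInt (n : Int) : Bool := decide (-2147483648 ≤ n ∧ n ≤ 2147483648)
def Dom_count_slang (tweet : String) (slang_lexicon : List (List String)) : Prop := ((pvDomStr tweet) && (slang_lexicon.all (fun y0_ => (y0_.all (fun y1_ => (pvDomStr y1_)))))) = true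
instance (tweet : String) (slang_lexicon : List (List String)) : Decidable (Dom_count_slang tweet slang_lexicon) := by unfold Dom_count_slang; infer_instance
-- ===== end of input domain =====

-- B replaces A's per-lexicon-entry scans of the tweet by one frequency dictionary of the
-- lexicon heads and a single pass over the tweet words (objective: alternative decomposition).

-- ===== PORT A =====
-- casefold = lower on the ASCII domain Dom_count_slang restricts to
def lower_case (tweet : String) : String := PySem.Str.lower tweet

def count_slang (tweet : String) (slang_lexicon : List (List String)) : Int :=
  let tweet1 := PySem.Str.split₀ (PySem.Str.strip tweet)
  let tweet_join := PySem.Str.join " " tweet1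
  let tweet_lower0 := lower_case tweet_join
  let tweet_lower := PySem.Str.split₀ (PySem.Str.strip tweet_lower0)
  slang_lexicon.foldl (fun count abr =>
    -- abr[0]: IndexError on an empty entry is excluded by Pre_count_slang
    let h := (PySem.List.pyGet? abr 0).getD ""
    if tweet_lower.contains h then
      (PySem.List.pyRange 0 (PySem.List.len tweet_lower) 1).foldl (fun count i =>
        if PySem.List.pyGetD tweet_lower i "" == h then count + 1 else count) count
    else count) 0

-- ===== PORT B =====
def count_slang_alt (tweet : String) (slang_lexicon : List (List String)) : Int :=
  let words := PySem.Str.split₀ (PySem.Str.strip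
    (lower_case (PySem.Str.join " " (PySem.Str.split₀ (PySem.Str.strip tweet)))))
  let slang_counts : PySem.Dict String Int := slang_lexicon.foldl (fun d abr =>
    -- abr[0]: IndexError on an empty entry is excluded by Pre_count_slang
    let h := (PySem.List.pyGet? abr 0).getD ""
    d.insert h (d.getD h 0 + 1)) PySem.Dict.empty
  words.foldl (fun c w => c + slang_counts.getD w 0) 0

-- ===== PRECONDITION & SPEC =====
-- Pre_ excludes lexicons containing an empty entry, on which A's 'abr[0]' raises IndexError.
def Pre_count_slang (tweet : String) (slang_lexicon : List (List String)) : Prop :=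
  ∀ abr ∈ slang_lexicon, abr ≠ []
instance (tweet : String) (slang_lexicon : List (List String)) : Decidable (Pre_count_slang tweet slang_lexicon) := by unfold Pre_count_slang; infer_instance

def pvWitness_count_slang : String × List (List String) :=
  ("  OMG lol  omg x", [["omg", "oh my god"], ["lol", "laugh out loud"], ["omg", "dup"]])

def Spec_count_slang (tweet : String) (slang_lexicon : List (List String)) (out : Int) : Prop := out = count_slang_alt tweet slang_lexicon
instance (tweet : String) (slang_lexicon : List (List String)) (out : Int) : Decidable (Spec_count_slang tweet slang_lexicon out) := by unfold Spec_count_slang; infer_instance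

-- ===== CLAIM (what is proved, stated in full; the proofs are below) =====
def Claim_equal_count_slang : Prop := ∀ (tweet : String) (slang_lexicon : List (List String)), Dom_count_slang tweet slang_lexicon → Pre_count_slang tweet slang_lexicon → Spec_count_slang tweet slang_lexicon (count_slang tweet slang_lexicon)

-- ===== LEMMAS AND PROOFS =====

-- double-counting exchange: summing tweet-word counts over the lexicon heads equals
-- summing lexicon-head counts over the tweet words
theorem pv_sum_count_comm (hs ws : List String) :
    (hs.map (fun h => (ws.count h : Int))).sum = (ws.map (fun w => (hs.count w : Int))).sum := by
  induction hs with
  | nil => simp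
  | cons h t ih =>
    have hsplit : (ws.map (fun w => ((h :: t).count w : Int))).sum
        = (ws.map (fun w => (if w == h then (1 : Int) else 0) + (t.count w : Int))).sum := by
      apply congrArg
      apply List.map_congr_left
      intro w _
      simp [List.count_cons]
      by_cases hwh : w = h
      · subst hwh; simp [add_comm]
      · simp [hwh, Ne.symm hwh]
    rw [hsplit, PySem.List.sum_map_add_int, List.map_cons, List.sum_cons, ih]
    have hcnt : (ws.map (fun w => if w == h then (1 : Int) else 0)).sum = (ws.count h : Int) := by
      rw [PySem.List.sum_map_ite_one_zero]
      simp [List.count]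
    rw [hcnt]

-- A's loop over the lexicon computes the sum of tweet-word counts of the entry heads
theorem pv_A_loop (lex : List (List String)) (ws : List String) :
    lex.foldl (fun count abr =>
      let h := (PySem.List.pyGet? abr 0).getD ""
      if ws.contains h then
        (PySem.List.pyRange 0 (PySem.List.len ws) 1).foldl (fun count i =>
          if PySem.List.pyGetD ws i "" == h then count + 1 else count) count
      else count) 0
    = (lex.map (fun abr => (ws.count ((PySem.List.pyGet? abr 0).getD "") : Int))).sum := by
  have hstep : lex.foldl (fun count abr =>
      let h := (PySem.List.pyGet? abr 0).getD ""
      if ws.contains h then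
        (PySem.List.pyRange 0 (PySem.List.len ws) 1).foldl (fun count i =>
          if PySem.List.pyGetD ws i "" == h then count + 1 else count) count
      else count) 0
      = lex.foldl (fun count abr => count + (ws.count ((PySem.List.pyGet? abr 0).getD "") : Int)) 0 := by
    apply PySem.List.foldl_congr_mem
    intro acc abr _
    simp only []
    set h := (PySem.List.pyGet? abr 0).getD "" with hh
    have hinner : (PySem.List.pyRange 0 (PySem.List.len ws) 1).foldl (fun count i =>
        if PySem.List.pyGetD ws i "" == h then count + 1 else count) acc
        = acc + (ws.count h : Int) := by
      rw [show PySem.List.len ws = ((ws.length : Int)) from rfl]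
      rw [PySem.List.foldl_pyRange_zero_pyGetD' ws "" (fun c w => if w == h then c + 1 else c) acc]
      exact PySem.List.foldl_beq_add_one ws h acc
    by_cases hc : ws.contains h
    · rw [if_pos hc]; exact hinner
    · rw [if_neg hc]
      have : ws.count h = 0 := by
        rw [List.count_eq_zero]
        intro hmem
        exact hc (List.contains_iff_mem.mpr hmem)
      simp [this]
  rw [hstep, PySem.List.foldl_add]
  simp
theorem count_slang_eq (tweet : String) (slang_lexicon : List (List String)) :
    count_slang tweet slang_lexicon = count_slang_alt tweet slang_lexicon := by
  unfold count_slang count_slang_alt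
  simp only []
  set ws := PySem.Str.split₀ (PySem.Str.strip
    (lower_case (PySem.Str.join " " (PySem.Str.split₀ (PySem.Str.strip tweet))))) with hws
  rw [pv_A_loop]
  -- B side: the dictionary loop is Counter(heads), the word loop sums its lookups
  have hdict : slang_lexicon.foldl (fun d abr =>
      let h := (PySem.List.pyGet? abr 0).getD ""
      d.insert h (d.getD h 0 + 1)) PySem.Dict.empty
      = PySem.Dict.counter (slang_lexicon.map (fun abr => (PySem.List.pyGet? abr 0).getD "")) := by
    rw [← PySem.Dict.foldl_insert_getD_add_one_eq_counter, List.foldl_map]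
  rw [hdict]
  have hB : ws.foldl (fun c w =>
      c + (PySem.Dict.counter (slang_lexicon.map (fun abr => (PySem.List.pyGet? abr 0).getD ""))).getD w 0) 0
      = (ws.map (fun w => ((slang_lexicon.map (fun abr => (PySem.List.pyGet? abr 0).getD "")).count w : Int))).sum := by
    rw [PySem.List.foldl_add]
    simp [PySem.Dict.getD_counter]
  rw [hB, ← pv_sum_count_comm, List.map_map]
  rfl

-- ===== VERDICT (by name: the statement is the Claim_ definition above) =====
theorem count_slang_spec : Claim_equal_count_slang := by
  intro tweet lex _ _
  unfold Spec_count_slang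
  exact count_slang_eq tweet lex
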